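-- pv_equiv track=rewrite | github.com/hengshu-credit/hscredit | hscredit/report/mining/visualization.py | _add_theme_settings
-- ===== SOURCE A (Python) =====
-- from typing import Union, List, Dict, Optional, Tuple
--
-- THEME_COLOR = "#2639E9"  # 主色
--
-- def _add_theme_settings(dot_data: str, colors: List[str]) -> str:
--     """添加hscredit主题设置到DOT数据.
--
--     :param dot_data: DOT数据
--     :param colors: 颜色列表
--     :return: 修改后的DOT数据
--     """
--     lines = dot_data.split('\n')
--
--     # 在第一行后添加主题设置
--     new_lines = [
--         'digraph Tree {',
--         f'    graph [colorscheme="{THEME_COLOR}"];',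
--         f'    node [color="{THEME_COLOR}"];',
--         f'    edge [color="{THEME_COLOR}"];'
--     ]
--
--     # 跳过原有的digraph行
--     for line in lines[1:]:
--         new_lines.append(line)
--
--     return '\n'.join(new_lines)
-- ===== SOURCE B (Python) =====
-- THEME_COLOR = "#2639E9"  # 主色
--
-- def _add_theme_settings(dot_data, colors):
--     """Splice the theme header onto everything after the first line, no split/join of all lines."""
--     header = '\n'.join([
--         'digraph Tree {',
--         f'    graph [colorscheme="{THEME_COLOR}"];',
--         f'    node [color="{THEME_COLOR}"];',
--         f'    edge [color="{THEME_COLOR}"];',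
--     ])
--     idx = dot_data.find('\n')
--     return header + dot_data[idx:] if idx != -1 else header
-- ===== Notes on version B (the rewrite author's own statement) =====
-- stated objective: simpler
-- what changed: Instead of splitting the whole string into a list of lines, copying all lines after the first into a new list one by one and rejoining, B joins the four fixed header lines once, finds the first newline with str.find, and splices everything from that newline onto the header with a single slice (header alone if there is no newline).
import Mathlib
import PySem

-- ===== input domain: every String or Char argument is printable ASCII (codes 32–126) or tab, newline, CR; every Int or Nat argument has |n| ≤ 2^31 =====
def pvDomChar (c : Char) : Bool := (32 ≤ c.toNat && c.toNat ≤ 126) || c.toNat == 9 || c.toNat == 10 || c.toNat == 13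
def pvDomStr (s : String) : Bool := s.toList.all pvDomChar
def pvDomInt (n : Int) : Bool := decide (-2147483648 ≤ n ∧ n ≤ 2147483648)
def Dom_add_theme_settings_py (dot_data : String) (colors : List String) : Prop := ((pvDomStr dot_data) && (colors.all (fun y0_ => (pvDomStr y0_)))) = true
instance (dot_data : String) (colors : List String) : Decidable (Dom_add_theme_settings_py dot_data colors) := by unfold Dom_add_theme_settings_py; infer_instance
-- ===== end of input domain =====

-- B replaces A's split-all-lines / copy-loop / rejoin pipeline by one find of the first newline
-- and a single slice spliced after the fixed header (objective: simpler).


-- THEME_COLOR = "#2639E9"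
def pvThemeColor : String := "#2639E9"

-- the four fixed header lines (shared literal text of both Pythons)
def pvHeaderLines : List String :=
  ["digraph Tree {",
   "    graph [colorscheme=\"" ++ pvThemeColor ++ "\"];",
   "    node [color=\"" ++ pvThemeColor ++ "\"];",
   "    edge [color=\"" ++ pvThemeColor ++ "\"];"]

-- ===== PORT A =====
def add_theme_settings_py (dot_data : String) (colors : List String) : String :=
  -- lines = dot_data.split('\n')  (sep is the nonempty literal "\n": Chars.splitOn is exact here)
  let lines : List String := (PySem.Chars.splitOn dot_data.toList "\n".toList).map String.ofList
  let new_lines : List String := pvHeaderLines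
  -- for line in lines[1:]: new_lines.append(line)
  let new_lines := (lines.drop 1).foldl (fun acc line => acc ++ [line]) new_lines
  PySem.Str.join "\n" new_lines

-- ===== PORT B =====
def add_theme_settings_py_alt (dot_data : String) (colors : List String) : String :=
  let header : String := PySem.Str.join "\n" pvHeaderLines
  let idx : Int := PySem.Str.find dot_data "\n"
  if idx ≠ -1 then header ++ PySem.Str.slice dot_data (some idx) none else header

-- ===== PRECONDITION & SPEC =====
def Spec_add_theme_settings_py (dot_data : String) (colors : List String) (out : String) : Prop := out = add_theme_settings_py_alt dot_data colors
instance (dot_data : String) (colors : List String) (out : String) : Decidable (Spec_add_theme_settings_py dot_data colors out) := by unfold Spec_add_theme_settings_py; infer_instance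

-- ===== CLAIM (what is proved, stated in full; the proofs are below) =====
def Claim_equal_add_theme_settings_py : Prop := ∀ (dot_data : String) (colors : List String), Dom_add_theme_settings_py dot_data colors → Spec_add_theme_settings_py dot_data colors (add_theme_settings_py dot_data colors)

-- ===== LEMMAS AND PROOFS =====

-- a plain structural model of str.split('\n')
def mySplit : List Char → List (List Char)
  | [] => [[]]
  | c :: rest => if c = '\n' then [] :: mySplit rest else (mySplit rest).modifyHead (c :: ·)

theorem mySplit_ne_nil (cs : List Char) : mySplit cs ≠ [] := by
  induction cs with
  | nil => simp [mySplit]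
  | cons c rest ih =>
    simp only [mySplit]
    split_ifs
    · simp
    · cases hms : mySplit rest with
      | nil => exact absurd hms ih
      | cons t ts => simp [List.modifyHead]

theorem go_eq_mySplit : ∀ (cs : List Char) (fuel : Nat) (cur : List Char) (acc : List (List Char)),
    cs.length < fuel →
    PySem.Chars.splitOn.go ['\n'] fuel cs cur acc
      = acc.reverse ++ (mySplit cs).modifyHead (cur.reverse ++ ·) := by
  intro cs
  induction cs with
  | nil =>
    intro fuel cur acc h
    cases fuel with
    | zero => omega
    | succ f =>
      rw [PySem.Chars.splitOn.go]
      · simp [mySplit]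
      · omega
  | cons c rest ih =>
    intro fuel cur acc h
    cases fuel with
    | zero => simp at h
    | succ f =>
      rw [PySem.Chars.splitOn.go]
      by_cases hc : c = '\n'
      · have hp : List.isPrefixOf ['\n'] (c :: rest) = true := by simp [hc, List.isPrefixOf]
        simp only [hp, if_pos]
        have hdrop : List.drop (['\n'].length) (c :: rest) = rest := by simp
        rw [hdrop, ih f [] (cur.reverse :: acc) (by simpa using h)]
        cases hms : mySplit rest <;> simp [mySplit, hc, List.modifyHead, hms]
      · have hp : List.isPrefixOf ['\n'] (c :: rest) = false := by
          simp [List.isPrefixOf]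
          exact fun hcc => hc hcc.symm
        simp only [hp, Bool.false_eq_true, if_false]
        rw [ih f (c :: cur) acc (by simpa using h)]
        simp only [mySplit, hc, List.reverse_cons]
        cases hms : mySplit rest with
        | nil => exact absurd hms (mySplit_ne_nil rest)
        | cons t ts => simp [List.modifyHead]

theorem splitOn_eq_mySplit (cs : List Char) : PySem.Chars.splitOn cs ['\n'] = mySplit cs := by
  rw [PySem.Chars.splitOn]
  rw [go_eq_mySplit cs (cs.length + 1) [] [] (by omega)]
  cases hms : mySplit cs with
  | nil => exact absurd hms (mySplit_ne_nil cs)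
  | cons t ts => simp [List.modifyHead]

theorem join_mySplit (cs : List Char) : PySem.Chars.join ['\n'] (mySplit cs) = cs := by
  induction cs with
  | nil => simp [mySplit, PySem.Chars.join_singleton]
  | cons c rest ih =>
    simp only [mySplit]
    by_cases hc : c = '\n'
    · cases hms : mySplit rest with
      | nil => exact absurd hms (mySplit_ne_nil rest)
      | cons t ts =>
        rw [if_pos hc, PySem.Chars.join_cons_cons]
        rw [hms] at ih
        simp [hc, ih]
    · rw [if_neg hc]
      cases hms : mySplit rest with
      | nil => exact absurd hms (mySplit_ne_nil rest)
      | cons t ts =>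
        rw [hms] at ih
        cases ts with
        | nil =>
          rw [PySem.Chars.join_singleton] at ih
          simp [List.modifyHead, PySem.Chars.join_singleton, ih]
        | cons u us =>
          simp only [List.modifyHead, PySem.Chars.join_cons_cons] at ih ⊢
          simp [← ih]

theorem mySplit_no_nl (cs : List Char) (h : '\n' ∉ cs) : mySplit cs = [cs] := by
  induction cs with
  | nil => simp [mySplit]
  | cons c rest ih =>
    simp only [List.mem_cons, not_or] at h
    have hc : ¬ c = '\n' := fun hh => h.1 hh.symm
    simp [mySplit, hc, ih h.2, List.modifyHead]

theorem mySplit_tail_ne_nil (cs : List Char) (h : '\n' ∈ cs) : (mySplit cs).drop 1 ≠ [] := by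
  induction cs with
  | nil => simp at h
  | cons c rest ih =>
    simp only [mySplit]
    by_cases hc : c = '\n'
    · simp [hc, mySplit_ne_nil]
    · have hr : '\n' ∈ rest := by
        rcases List.mem_cons.mp h with h1 | h1
        · exact absurd h1.symm hc
        · exact h1
      cases hms : mySplit rest with
      | nil => exact absurd hms (mySplit_ne_nil rest)
      | cons t ts =>
        rw [hms] at ih
        simp only [if_neg hc, List.modifyHead, List.drop_succ_cons, List.drop_zero]
        simpa using ih hr

theorem tail_join (cs : List Char) (h : '\n' ∈ cs) :
    '\n' :: PySem.Chars.join ['\n'] ((mySplit cs).drop 1) = cs.drop (cs.idxOf '\n') := by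
  induction cs with
  | nil => simp at h
  | cons c rest ih =>
    by_cases hc : c = '\n'
    · subst hc
      simp [mySplit, join_mySplit]
    · have hr : '\n' ∈ rest := by
        rcases List.mem_cons.mp h with h1 | h1
        · exact absurd h1.symm hc
        · exact h1
      have hidx : (c :: rest).idxOf '\n' = rest.idxOf '\n' + 1 := by
        simp [hc]
      rw [hidx]
      simp only [List.drop_succ_cons]
      rw [← ih hr]
      congr 1
      simp only [mySplit, if_neg hc]
      cases hms : mySplit rest with
      | nil => exact absurd hms (mySplit_ne_nil rest)
      | cons t ts => simp [List.modifyHead]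

theorem find_go_nl : ∀ (cs : List Char) (k : Nat),
    PySem.Chars.find.go ['\n'] cs k = if '\n' ∈ cs then ((k : Int) + cs.idxOf '\n') else -1 := by
  intro cs
  induction cs with
  | nil => intro k; rw [PySem.Chars.find.go]; simp
  | cons c rest ih =>
    intro k
    rw [PySem.Chars.find.go]
    by_cases hc : c = '\n'
    · have hp : List.isPrefixOf ['\n'] (c :: rest) = true := by simp [hc, List.isPrefixOf]
      simp [hc]
    · have hp : List.isPrefixOf ['\n'] (c :: rest) = false := by
        simp [List.isPrefixOf]
        exact fun hcc => hc hcc.symm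
      simp only [hp, Bool.false_eq_true, if_false]
      rw [ih (k + 1)]
      by_cases hr : '\n' ∈ rest
      · have hidx : (c :: rest).idxOf '\n' = rest.idxOf '\n' + 1 := by simp [hc]
        simp [hr, hidx]
        ring
      · have hnc : '\n' ∉ c :: rest := by
          intro hmem
          rcases List.mem_cons.mp hmem with h1 | h1
          · exact hc h1.symm
          · exact hr h1
        simp [hr, hnc]

theorem find_nl (cs : List Char) :
    PySem.Chars.find cs ['\n'] = if '\n' ∈ cs then (cs.idxOf '\n' : Int) else -1 := by
  rw [PySem.Chars.find, find_go_nl]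
  simp

theorem join4_append {a b c d : List Char} (t : List (List Char)) (ht : t ≠ []) :
    PySem.Chars.join ['\n'] ([a, b, c, d] ++ t)
      = PySem.Chars.join ['\n'] [a, b, c, d] ++ '\n' :: PySem.Chars.join ['\n'] t := by
  cases t with
  | nil => exact absurd rfl ht
  | cons x xs =>
    simp only [List.cons_append, List.nil_append, PySem.Chars.join_cons_cons,
      PySem.Chars.join_singleton]
    simp [List.append_assoc]

-- ===== VERDICT (by name: the statement is the Claim_ definition above) =====
theorem add_theme_settings_py_spec : Claim_equal_add_theme_settings_py := by
  intro dot_data colors _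
  unfold Spec_add_theme_settings_py add_theme_settings_py add_theme_settings_py_alt
  apply String.toList_inj.mp
  simp only [PySem.List.foldl_append_singleton]
  set cs : List Char := dot_data.toList with hcs
  have hnlit : "\n".toList = ['\n'] := rfl
  have hsplit : PySem.Chars.splitOn dot_data.toList "\n".toList = mySplit cs := by
    rw [hnlit]; exact splitOn_eq_mySplit cs
  have hfind : PySem.Str.find dot_data "\n" = if '\n' ∈ cs then (cs.idxOf '\n' : Int) else -1 := by
    have hf := find_nl cs
    simp only [PySem.Str.find]
    rw [hnlit] at *
    simpa using hf
  have hmapid : List.map (String.toList ∘ String.ofList) ((mySplit cs).drop 1) = (mySplit cs).drop 1 := by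
    simp [Function.comp_def]
  have hH : pvHeaderLines.map String.toList
      = [("digraph Tree {").toList,
         ("    graph [colorscheme=\"" ++ pvThemeColor ++ "\"];").toList,
         ("    node [color=\"" ++ pvThemeColor ++ "\"];").toList,
         ("    edge [color=\"" ++ pvThemeColor ++ "\"];").toList] := by
    simp [pvHeaderLines]
  by_cases hn : '\n' ∈ cs
  · -- first newline exists: B splices dot_data[idx:]
    have hidxval : PySem.Str.find dot_data "\n" = (cs.idxOf '\n' : Int) := by
      rw [hfind, if_pos hn]
    rw [hidxval, if_pos (show ((cs.idxOf '\n' : Int)) ≠ -1 by omega)]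
    rw [hsplit]
    simp only [PySem.Str.join, String.toList_ofList, String.toList_append, PySem.Str.toList_slice]
    rw [List.map_append, ← List.map_drop, List.map_map, hmapid, hnlit, hH]
    rw [join4_append ((mySplit cs).drop 1) (mySplit_tail_ne_nil cs hn)]
    congr 1
    rw [tail_join cs hn]
    simp only [PySem.Chars.slice_eq_listSlice]
    rw [PySem.List.slice_from cs (by positivity)]
    simp
  · -- no newline: both return the header alone
    have hidxval : PySem.Str.find dot_data "\n" = -1 := by rw [hfind, if_neg hn]
    rw [hidxval, if_neg (by simp)]
    rw [hsplit, mySplit_no_nl cs hn]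
    simp [PySem.Str.join]
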